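-- pv_equiv track=rewrite | github.com/edt-yxz-zzd/python3_src | nn_ns/graph/graph_format_g6_s6.py | up32bin
-- ===== SOURCE A (Python) =====
-- def up32bin(edge, nv):
--     nbit = nv*(nv-1)//2
--     bs = ['0']*nbit
--     for row, col in edge:
--         assert 0 <= row < col < nv
--         pre = col*(col-1)//2
--         idx = pre + row
--         assert bs[idx] == '0'
--         bs[idx] = '1'
--     return ''.join(bs)
-- ===== SOURCE B (Python) =====
-- def up32bin(edge, nv):
--     # group the rows of each column, then fill the nbit bit positions by emitting
--     # successive column blocks (block of column c covers rows 0..c-1) until full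
--     nbit = nv*(nv-1)//2
--     cols = {}
--     for row, col in edge:
--         assert 0 <= row < col < nv
--         rows = cols.setdefault(col, [])
--         assert row not in rows
--         rows.append(row)
--     parts = []
--     total = 0
--     col = 1
--     while total < nbit:
--         rows = cols.get(col, [])
--         parts.append(''.join('1' if r in rows else '0' for r in range(col)))
--         total += col
--         col += 1
--     return ''.join(parts)
-- ===== Notes on version B (the rewrite author's own statement) =====
-- stated objective: alternative
-- what changed: A computes a global triangular bit index col*(col-1)//2+row per edge and scatters '1's into a preallocated list; B never computes bit indices: it groups the rows of each column in a dict and then fills the nbit positions by emitting per-column blocks (membership test per row) until the bitstring is full.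
import Mathlib
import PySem

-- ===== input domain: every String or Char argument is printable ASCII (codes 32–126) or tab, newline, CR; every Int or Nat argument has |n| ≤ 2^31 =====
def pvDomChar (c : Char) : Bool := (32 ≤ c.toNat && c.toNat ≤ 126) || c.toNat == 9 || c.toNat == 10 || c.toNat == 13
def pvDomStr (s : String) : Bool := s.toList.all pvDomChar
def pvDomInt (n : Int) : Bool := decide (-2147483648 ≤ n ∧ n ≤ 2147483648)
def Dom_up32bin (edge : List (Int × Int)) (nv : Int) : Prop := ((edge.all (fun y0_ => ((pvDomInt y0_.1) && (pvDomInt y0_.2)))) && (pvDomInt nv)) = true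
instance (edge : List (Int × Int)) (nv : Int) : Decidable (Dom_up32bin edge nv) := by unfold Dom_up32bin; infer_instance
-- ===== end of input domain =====

-- B replaces A's scatter of '1's at computed triangular bit indices by grouping the rows of
-- each column in a dict and filling the nbit positions column block by column block
-- (alternative decomposition; B never computes a bit index).

-- ===== PORT A =====
def up32bin (edge : List (Int × Int)) (nv : Int) : String :=
  let nbit := PySem.Int.floordiv (nv * (nv - 1)) 2
  let bs : List Char := List.replicate nbit.toNat '0'
  let bs := edge.foldl (fun bs p =>
    let pre := PySem.Int.floordiv (p.2 * (p.2 - 1)) 2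
    let idx := pre + p.1
    PySem.List.pySetD bs idx '1') bs   -- bs[idx] = '1'; total form, in range under Pre_
  String.ofList bs

-- ===== PORT B =====
-- the 'while total < nbit' loop of Source B; fuel only makes it total (the loop runs at most
-- nbit times, each iteration emits col ≥ 1 bits)
def up32binBlocks (cols : PySem.Dict Int (List Int)) (nbit : Int) :
    Nat → Int → Int → List Char
  | 0, _, _ => []
  | fuel + 1, total, col =>
    if total < nbit then
      ((PySem.List.pyRange 0 col 1).map (fun r =>
        if r ∈ PySem.Dict.getD cols col [] then '1' else '0'))
        ++ up32binBlocks cols nbit fuel (total + col) (col + 1)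
    else []

def up32bin_alt (edge : List (Int × Int)) (nv : Int) : String :=
  let nbit := PySem.Int.floordiv (nv * (nv - 1)) 2
  let cols : PySem.Dict Int (List Int) :=
    edge.foldl (fun d p => PySem.Dict.modify d p.2 [] (fun rows => rows ++ [p.1]))
      PySem.Dict.empty                  -- cols.setdefault(col, []).append(row)
  String.ofList (up32binBlocks cols nbit (nbit.toNat + 1) 0 1)

-- ===== PRECONDITION & SPEC =====
-- Pre_ is exactly where Python A returns: every edge satisfies 0 ≤ row < col < nv (first
-- assert) and no edge is repeated (second assert; on valid edges duplicate bit index =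
-- duplicate pair).
def Pre_up32bin (edge : List (Int × Int)) (nv : Int) : Prop :=
  (∀ p ∈ edge, 0 ≤ p.1 ∧ p.1 < p.2 ∧ p.2 < nv) ∧ edge.Nodup
instance (edge : List (Int × Int)) (nv : Int) : Decidable (Pre_up32bin edge nv) := by
  unfold Pre_up32bin; infer_instance
def pvWitness_up32bin : (List (Int × Int)) × Int := ([(0, 1), (0, 2)], 3)

def Spec_up32bin (edge : List (Int × Int)) (nv : Int) (out : String) : Prop := out = up32bin_alt edge nv
instance (edge : List (Int × Int)) (nv : Int) (out : String) : Decidable (Spec_up32bin edge nv out) := by unfold Spec_up32bin; infer_instance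

-- ===== CLAIM (what is proved, stated in full; the proofs are below) =====
def Claim_equal_up32bin : Prop := ∀ (edge : List (Int × Int)) (nv : Int), Dom_up32bin edge nv → Pre_up32bin edge nv → Spec_up32bin edge nv (up32bin edge nv)

-- ===== LEMMAS AND PROOFS =====

-- proof-only helpers: the triangular offset col*(col-1)//2 and the bit index of an edge
def triI (c : Int) : Int := PySem.Int.floordiv (c * (c - 1)) 2
def idxI (p : Int × Int) : Int := triI p.2 + p.1

lemma two_triI (c : Int) : 2 * triI c = c * (c - 1) := by
  obtain ⟨k, hk⟩ := Int.even_mul_pred_self c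
  unfold triI
  rw [PySem.Int.floordiv_eq_ediv_of_pos (by omega : (0:Int) < 2), hk]
  omega

lemma triI_succ (c : Int) : triI (c + 1) = triI c + c := by
  have e1 := two_triI (c + 1); have e2 := two_triI c
  have h3 : (c + 1) * (c + 1 - 1) = c * (c - 1) + 2 * c := by ring
  omega

lemma triI_mono {a b : Int} (h0 : 0 ≤ a) (hab : a ≤ b) : triI a ≤ triI b := by
  have h1 := two_triI a; have h2 := two_triI b
  rcases eq_or_lt_of_le hab with h | h
  · rw [h]
  · nlinarith [mul_nonneg (by omega : (0:Int) ≤ b - a) (by omega : (0:Int) ≤ a + b - 1)]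

lemma triI_lt {c M : Int} (h1 : 1 ≤ c) (h : c < M) : triI c < triI M := by
  have hs := triI_succ c
  have hm := triI_mono (by omega : (0:Int) ≤ c + 1) (by omega : c + 1 ≤ M)
  omega

-- setting index k < n in a range-map is pointwise update
lemma set_range_map (n k : Nat) (f : Nat → Char) (_ : k < n) :
    ((List.range n).map f).set k '1'
      = (List.range n).map (fun i => if i = k then '1' else f i) := by
  apply List.ext_getElem
  · simp
  · intro i h1 h2
    simp only [List.getElem_set, List.getElem_map, List.getElem_range]
    by_cases h : k = i
    · subst h; simp
    · rw [if_neg h, if_neg (fun hh => h hh.symm)]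

-- A's scatter fold over a range-map equals a pointwise membership gather
lemma foldA_eq (edge : List (Int × Int)) (n : Nat) (f : Nat → Char)
    (hb : ∀ p ∈ edge, 0 ≤ idxI p ∧ idxI p < (n : Int)) :
    (edge.foldl (fun bs p =>
        PySem.List.pySetD bs (PySem.Int.floordiv (p.2 * (p.2 - 1)) 2 + p.1) '1')
      ((List.range n).map f))
      = (List.range n).map (fun (i : Nat) =>
          if ((i : Int) ∈ edge.map idxI) then '1' else f i) := by
  induction edge generalizing f with
  | nil => simp
  | cons p rest ih =>
    have hp := hb p (by simp)
    have hk : (idxI p).toNat < n := by omega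
    have hidx : PySem.Int.floordiv (p.2 * (p.2 - 1)) 2 + p.1 = idxI p := rfl
    simp only [List.foldl_cons, hidx]
    rw [PySem.List.pySetD_of_nonneg _ _ hp.1, set_range_map n (idxI p).toNat _ hk,
        ih _ (fun q hq => hb q (by simp [hq]))]
    apply List.ext_getElem
    · simp
    · intro i h1 h2
      simp only [List.getElem_map, List.getElem_range, List.map_cons, List.mem_cons]
      by_cases hr : (i : Int) ∈ rest.map idxI
      · simp [hr]
      · by_cases he : (i : Int) = idxI p
        · have hik : i = (idxI p).toNat := by omega
          simp [hik]
          intro hneg _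
          exact absurd hp.1 (by omega)
        · have hik : i ≠ (idxI p).toNat := by omega
          simp [hr, he, hik]

-- B's dict of per-column row lists, characterised
lemma getD_cols (edge : List (Int × Int)) (c : Int) :
    (edge.foldl (fun d p => PySem.Dict.modify d p.2 [] (fun rows => rows ++ [p.1]))
        PySem.Dict.empty).getD c []
      = (edge.filter (fun p => p.2 == c)).map (fun p => p.1) := by
  have h := PySem.Dict.getD_foldl_modify_append (edge.map (fun p => (p.2, p.1)))
    (PySem.Dict.empty (κ := Int) (ν := List Int)) c
  rw [List.foldl_map] at h
  simpa [List.filter_map, Function.comp] using h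

lemma mem_cols_iff (edge : List (Int × Int)) (c r : Int) :
    (r ∈ (edge.filter (fun p => p.2 == c)).map (fun p => p.1)) ↔ (r, c) ∈ edge := by
  simp only [List.mem_map, List.mem_filter, beq_iff_eq]
  constructor
  · rintro ⟨p, ⟨hp, hc⟩, hr⟩
    have : p = (r, c) := by cases p; simp_all
    rwa [this] at hp
  · intro h
    exact ⟨(r, c), ⟨h, rfl⟩, rfl⟩

-- a bit position triI m + k (0 ≤ k < m) is hit by an edge iff (k, m) is an edge
lemma idx_mem_iff (edge : List (Int × Int))
    (hv : ∀ p ∈ edge, 0 ≤ p.1 ∧ p.1 < p.2) (m k : Int) (hm : 1 ≤ m)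
    (hk0 : 0 ≤ k) (hkm : k < m) :
    (triI m + k) ∈ edge.map idxI ↔ (k, m) ∈ edge := by
  constructor
  · rintro h
    rw [List.mem_map] at h
    obtain ⟨p, hp, hidx⟩ := h
    obtain ⟨h1, h2⟩ := hv p hp
    have hcm : p.2 = m := by
      by_contra hne
      rcases lt_or_gt_of_ne hne with hlt | hgt
      · -- p.2 < m : idxI p < triI (p.2+1) ≤ triI m
        have ht := triI_succ p.2
        have hmono := triI_mono (by omega : (0:Int) ≤ p.2 + 1) (by omega : p.2 + 1 ≤ m)
        have hlt2 : idxI p < triI m := by unfold idxI; linarith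
        rw [hidx] at hlt2; linarith
      · -- m < p.2 : idxI p ≥ triI (m+1) = triI m + m > triI m + k
        have ht := triI_succ m
        have hmono := triI_mono (by omega : (0:Int) ≤ m + 1) (by omega : m + 1 ≤ p.2)
        have hge : triI m + m ≤ idxI p := by unfold idxI; linarith
        rw [hidx] at hge; linarith
    have hrk : p.1 = k := by unfold idxI at hidx; rw [hcm] at hidx; omega
    have : p = (k, m) := by cases p; simp_all
    rwa [this] at hp
  · intro h
    exact List.mem_map.mpr ⟨(k, m), h, by unfold idxI triI; rfl⟩

-- the global triangular bitstring is the concatenation of the per-column blocks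
lemma blocks_eq (edge : List (Int × Int))
    (hv : ∀ p ∈ edge, 0 ≤ p.1 ∧ p.1 < p.2) :
    ∀ m : Int, 0 ≤ m →
    (List.range (triI m).toNat).map (fun (i : Nat) =>
        if ((i : Int) ∈ edge.map idxI) then '1' else '0')
      = (PySem.List.pyRange 1 m 1).flatMap (fun c =>
          (PySem.List.pyRange 0 c 1).map (fun r =>
            if (r, c) ∈ edge then '1' else '0')) := by
  intro m hm
  induction m, hm using Int.le_induction with
  | base =>
    rw [PySem.List.pyRange_one_eq_nil (by omega)]
    simp [triI, PySem.Int.floordiv]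
  | succ m hm ih =>
    by_cases hm1 : m = 0
    · subst hm1
      rw [PySem.List.pyRange_one_eq_nil (by omega)]
      have : triI 1 = 0 := by have := two_triI 1; omega
      simp [this]
    · obtain ⟨n, rfl⟩ : ∃ n : Nat, m = (n : Int) := ⟨m.toNat, by omega⟩
      have hm1' : 1 ≤ (n : Int) := by omega
      have htnn : 0 ≤ triI (n : Int) := by have := two_triI (n : Int); nlinarith
      have htsucc := triI_succ (n : Int)
      have htoNat : (triI ((n : Int) + 1)).toNat = (triI (n : Int)).toNat + n := by omega
      rw [PySem.List.pyRange_one_succ_right (by omega : (1:Int) ≤ (n : Int)), List.flatMap_append,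
          ← ih, htoNat, List.range_add, List.map_append, List.map_map]
      congr 1
      -- the new block: positions triI n + k, k < n, vs column n
      rw [List.flatMap_cons, List.flatMap_nil, List.append_nil,
          PySem.List.pyRange_zero_nat n, List.map_map]
      apply List.map_congr_left
      intro k hk
      rw [List.mem_range] at hk
      have hcast : (((triI (n : Int)).toNat + k : Nat) : Int) = triI (n : Int) + (k : Int) := by
        push_cast; omega
      simp only [Function.comp]
      rw [hcast]
      have hiff := idx_mem_iff edge hv (n : Int) (k : Int) hm1' (by omega) (by omega)
      by_cases hmem : ((k : Int), (n : Int)) ∈ edge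
      · rw [if_pos (hiff.mpr hmem), if_pos hmem]
      · rw [if_neg (fun h => hmem (hiff.mp h)), if_neg hmem]

-- B's while loop, started at column c with total = triI c, emits the blocks of columns c..M-1
lemma blocksLoop_eq (cols : PySem.Dict Int (List Int)) (M : Int) (hM : 1 ≤ M) :
    ∀ (fuel : Nat) (c : Int), 1 ≤ c → c ≤ M → (M - c) < (fuel : Int) →
    up32binBlocks cols (triI M) fuel (triI c) c
      = (PySem.List.pyRange c M 1).flatMap (fun col =>
          (PySem.List.pyRange 0 col 1).map (fun r =>
            if r ∈ PySem.Dict.getD cols col [] then '1' else '0')) := by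
  intro fuel
  induction fuel with
  | zero => intro c h1 h2 h3; exfalso; omega
  | succ fuel ih =>
    intro c h1 h2 h3
    by_cases hc : c < M
    · have hlt : triI c < triI M := triI_lt h1 hc
      have hnext : triI c + c = triI (c + 1) := (triI_succ c).symm
      simp only [up32binBlocks]
      rw [if_pos hlt, hnext, ih (c + 1) (by omega) (by omega) (by push_cast; omega),
          PySem.List.pyRange_one_cons hc, List.flatMap_cons]
    · have hcM : c = M := by omega
      subst hcM
      simp only [up32binBlocks]
      rw [if_neg (lt_irrefl _), PySem.List.pyRange_one_eq_nil (le_refl c), List.flatMap_nil]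

-- ===== VERDICT (by name: the statement is the Claim_ definition above) =====
theorem up32bin_spec : Claim_equal_up32bin := by
  intro edge nv _ hpre
  unfold Spec_up32bin
  obtain ⟨hv, _⟩ := hpre
  have hv' : ∀ p ∈ edge, 0 ≤ p.1 ∧ p.1 < p.2 :=
    fun p hp => ⟨(hv p hp).1, (hv p hp).2.1⟩
  -- the column count M: nbit = triI M with M ≥ 1, for every nv
  set M : Int := if 1 ≤ nv then nv else 1 - nv with hMdef
  have hM1 : 1 ≤ M := by rw [hMdef]; split_ifs <;> omega
  have htriM : triI nv = triI M := by
    rw [hMdef]; split_ifs with h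
    · rfl
    · have e1 := two_triI nv; have e2 := two_triI (1 - nv)
      have h3 : (1 - nv) * (1 - nv - 1) = nv * (nv - 1) := by ring
      omega
  have htri1 : triI 1 = 0 := by have := two_triI 1; omega
  have htMnn : 0 ≤ triI M := by
    have := triI_mono (by omega : (0:Int) ≤ 1) hM1; omega
  have hA : up32bin edge nv
      = String.ofList ((List.range (triI nv).toNat).map (fun (i : Nat) =>
          if ((i : Int) ∈ edge.map idxI) then '1' else '0')) := by
    have hb : ∀ p ∈ edge, 0 ≤ idxI p ∧ idxI p < (((triI nv).toNat : Nat) : Int) := by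
      intro p hp
      obtain ⟨h1, h2, h3⟩ := hv p hp
      have ht2 := two_triI p.2
      have h0 : 0 ≤ triI p.2 := by nlinarith
      have hts := triI_succ p.2
      have hmono := triI_mono (by omega : (0:Int) ≤ p.2 + 1) (by omega : p.2 + 1 ≤ nv)
      have htnn : 0 ≤ triI nv := le_trans (by omega) hmono
      constructor
      · unfold idxI; omega
      · unfold idxI; omega
    show String.ofList (edge.foldl (fun bs p =>
        PySem.List.pySetD bs (PySem.Int.floordiv (p.2 * (p.2 - 1)) 2 + p.1) '1')
        (List.replicate (triI nv).toNat '0')) = _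
    have hrep : List.replicate (triI nv).toNat '0'
        = (List.range (triI nv).toNat).map (fun _ => '0') := by simp
    rw [hrep, foldA_eq edge (triI nv).toNat _ hb]
  have hfuel : M - 1 < ((triI nv).toNat + 1 : Nat) := by
    -- triI M ≥ M - 1
    have h2 := two_triI M
    have : 2 * (M - 1) ≤ 2 * triI M := by nlinarith [mul_nonneg (by omega : (0:Int) ≤ M - 1) (by omega : (0:Int) ≤ M - 1)]
    push_cast; omega
  have hB : up32bin_alt edge nv
      = String.ofList ((PySem.List.pyRange 1 M 1).flatMap (fun c =>
          (PySem.List.pyRange 0 c 1).map (fun r =>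
            if (r, c) ∈ edge then '1' else '0'))) := by
    show String.ofList (up32binBlocks (edge.foldl (fun d p =>
        PySem.Dict.modify d p.2 [] (fun rows => rows ++ [p.1])) PySem.Dict.empty)
        (triI nv) ((triI nv).toNat + 1) 0 1) = _
    conv_lhs => rw [htriM, show (0:Int) = triI 1 from htri1.symm]
    rw [blocksLoop_eq _ M hM1 ((triI M).toNat + 1) 1 (by omega) hM1
          (by rw [← htriM]; exact_mod_cast hfuel)]
    simp only [getD_cols, mem_cols_iff]
  rw [hA, hB, htriM]
  exact congrArg String.ofList (blocks_eq edge hv' M (by omega))
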